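-- pv_equiv track=rewrite | github.com/JiajiaLi-1130/PIA | eval/defense/benign_judge.py | parse_safety_assessment
-- ===== SOURCE A (Python) =====
-- from typing import Any, Dict
--
-- def parse_safety_assessment(assessment: str) -> dict[str, Any]:
--     """Parse the WildGuard classifier output into structured fields.
--
--     Expects lines containing labels like 'Harmful request:',
--     'Response refusal:', and 'Harmful response:'. Returns a dict with
--     boolean or None values.
--     """
--     lines = assessment.strip().split('\n')
--     if not lines:
--         return {
--             "is_safe": None,
--             "harmful_request": None,
--             "response_refusal": None,
--             "harmful_response": None
--         }
--
--     harmful_request = None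
--     response_refusal = None
--     harmful_response = None
--
--     for line in lines:
--         line = line.strip().lower()
--         if line.startswith('harmful request:'):
--             harmful_request = 'yes' in line
--         elif line.startswith('response refusal:'):
--             response_refusal = 'yes' in line
--         elif line.startswith('harmful response:'):
--             harmful_response = 'yes' in line
--
--     is_safe = None
--     if harmful_response is not None:
--         is_safe = not harmful_response
--
--     return {
--         "is_safe": is_safe,
--         "harmful_request": harmful_request,
--         "response_refusal": response_refusal,
--         "harmful_response": harmful_response
--     }
-- ===== SOURCE B (Python) =====
-- def _last_verdict(rev_lines, prefix):
--     for line in rev_lines: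
--         if line.startswith(prefix):
--             return 'yes' in line
--     return None
--
--
-- def parse_safety_assessment(assessment: str) -> dict:
--     """Same result as A: instead of one forward fold that keeps overwriting
--     three variables, scan the normalized lines back-to-front once per label
--     and take the first (i.e. last-in-order) matching line's verdict."""
--     rev = [line.strip().lower() for line in assessment.strip().split('\n')][::-1]
--     harmful_request = _last_verdict(rev, 'harmful request:')
--     response_refusal = _last_verdict(rev, 'response refusal:')
--     harmful_response = _last_verdict(rev, 'harmful response:')
--     return {
--         "is_safe": None if harmful_response is None else not harmful_response,
--         "harmful_request": harmful_request,
--         "response_refusal": response_refusal,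
--         "harmful_response": harmful_response,
--     }
-- ===== Notes on version B (the rewrite author's own statement) =====
-- stated objective: alternative
-- what changed: Replaces A's single forward fold that keeps overwriting three mutable variables (last write wins) with one backward scan per label that returns the first matching line's verdict, relying on the labels' prefixes being mutually exclusive.
import Mathlib
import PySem

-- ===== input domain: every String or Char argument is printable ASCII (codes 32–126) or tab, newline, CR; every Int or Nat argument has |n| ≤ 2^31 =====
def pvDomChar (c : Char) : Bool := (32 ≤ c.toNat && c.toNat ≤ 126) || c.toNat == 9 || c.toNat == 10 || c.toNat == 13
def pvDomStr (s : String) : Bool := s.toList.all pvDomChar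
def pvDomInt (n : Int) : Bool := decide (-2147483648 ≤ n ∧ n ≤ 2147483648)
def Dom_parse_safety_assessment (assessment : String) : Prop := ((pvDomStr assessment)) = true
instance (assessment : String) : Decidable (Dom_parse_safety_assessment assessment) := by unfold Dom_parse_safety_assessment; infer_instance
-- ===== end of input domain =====

-- B replaces A's forward fold over three overwritten variables by one backward scan per label
-- (first match in reverse order = last match in order); equal cost, different traversal.

-- ===== PORT A =====
-- A's loop body: strip+lower the line, then the if/elif chain updating the three variables
def pvStepA (st : Option Bool × Option Bool × Option Bool) (rawline : String) :
    Option Bool × Option Bool × Option Bool :=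
  let line := PySem.Str.lower (PySem.Str.strip rawline)
  if PySem.Str.startswith line "harmful request:" then
    (some (PySem.Str.isIn "yes" line), st.2.1, st.2.2)
  else if PySem.Str.startswith line "response refusal:" then
    (st.1, some (PySem.Str.isIn "yes" line), st.2.2)
  else if PySem.Str.startswith line "harmful response:" then
    (st.1, st.2.1, some (PySem.Str.isIn "yes" line))
  else st

def parse_safety_assessment (assessment : String) : List (String × Option Bool) :=
  let lines := (PySem.Str.split? (PySem.Str.strip assessment) "\n").getD []
  if lines.isEmpty then
    [("is_safe", none), ("harmful_request", none), ("response_refusal", none), ("harmful_response", none)]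
  else
    let st := lines.foldl pvStepA (none, none, none)
    let is_safe : Option Bool := match st.2.2 with
      | none => none
      | some b => some (!b)
    [("is_safe", is_safe), ("harmful_request", st.1), ("response_refusal", st.2.1),
     ("harmful_response", st.2.2)]

-- ===== PORT B =====
-- Source B's _last_verdict: first matching line of the (already reversed) list, else None
def pvLastVerdict : List String → String → Option Bool
  | [], _ => none
  | line :: rest, pre =>
    if PySem.Str.startswith line pre then some (PySem.Str.isIn "yes" line)
    else pvLastVerdict rest pre

def parse_safety_assessment_alt (assessment : String) : List (String × Option Bool) :=
  let rev := ((((PySem.Str.split? (PySem.Str.strip assessment) "\n").getD []).map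
      (fun l => PySem.Str.lower (PySem.Str.strip l))).reverse)
  let harmful_request := pvLastVerdict rev "harmful request:"
  let response_refusal := pvLastVerdict rev "response refusal:"
  let harmful_response := pvLastVerdict rev "harmful response:"
  [("is_safe", match harmful_response with | none => none | some b => some (!b)),
   ("harmful_request", harmful_request),
   ("response_refusal", response_refusal),
   ("harmful_response", harmful_response)]

-- ===== PRECONDITION & SPEC =====
def Spec_parse_safety_assessment (assessment : String) (out : List (String × Option Bool)) : Prop := out = parse_safety_assessment_alt assessment
instance (assessment : String) (out : List (String × Option Bool)) : Decidable (Spec_parse_safety_assessment assessment out) := by unfold Spec_parse_safety_assessment; infer_instance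

-- ===== CLAIM (what is proved, stated in full; the proofs are below) =====
def Claim_equal_parse_safety_assessment : Prop := ∀ (assessment : String), Dom_parse_safety_assessment assessment → Spec_parse_safety_assessment assessment (parse_safety_assessment assessment)

-- ===== LEMMAS AND PROOFS =====

theorem pvGo_ne_nil (sep : List Char) : ∀ (fuel : Nat) (l cur : List Char) (acc : List (List Char)),
    PySem.Chars.splitOn.go sep fuel l cur acc ≠ [] := by
  intro fuel
  induction fuel with
  | zero => intro l cur acc; simp [PySem.Chars.splitOn.go]
  | succ n ih =>
    intro l cur acc
    cases l with
    | nil => simp [PySem.Chars.splitOn.go]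
    | cons c rest =>
      rw [PySem.Chars.splitOn.go]
      split
      · exact ih _ _ _
      · exact ih _ _ _

theorem pvSplitOn_ne_nil (s sep : List Char) : PySem.Chars.splitOn s sep ≠ [] := by
  unfold PySem.Chars.splitOn
  exact pvGo_ne_nil _ _ _ _ _

-- mutual exclusivity of two label prefixes, neither of which is a prefix of the other
theorem pvStartswith_excl (s p q : String) (hp : ¬ p.toList <+: q.toList)
    (hq : ¬ q.toList <+: p.toList) (h : PySem.Str.startswith s p = true) :
    PySem.Str.startswith s q = false := by
  by_contra hcon
  rw [Bool.not_eq_false] at hcon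
  rw [PySem.Str.startswith_eq, PySem.Chars.startswith_iff] at h hcon
  rcases List.prefix_or_prefix_of_prefix h hcon with h1 | h1
  · exact hp h1
  · exact hq h1

theorem pvLastVerdict_append (xs ys : List String) (p : String) :
    pvLastVerdict (xs ++ ys) p = (pvLastVerdict xs p).or (pvLastVerdict ys p) := by
  induction xs with
  | nil => simp [pvLastVerdict]
  | cons x xs ih =>
    simp only [List.cons_append, pvLastVerdict]
    split
    · rfl
    · exact ih

-- the heart: A's fold from any initial state = per-label last match overriding the initial state
theorem pvLV_single (m p : String) (h : PySem.Str.startswith m p = true) :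
    pvLastVerdict [m] p = some (PySem.Str.isIn "yes" m) := by
  simp only [pvLastVerdict]; rw [if_pos h]

theorem pvLV_single_none (m p : String) (h : PySem.Str.startswith m p = false) :
    pvLastVerdict [m] p = none := by
  simp only [pvLastVerdict]; rw [h]; simp

theorem pvFoldl_eq (ls : List String) (a b c : Option Bool) :
    ls.foldl pvStepA (a, b, c) =
      ((pvLastVerdict ((ls.map (fun l => PySem.Str.lower (PySem.Str.strip l))).reverse) "harmful request:").or a,
       (pvLastVerdict ((ls.map (fun l => PySem.Str.lower (PySem.Str.strip l))).reverse) "response refusal:").or b,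
       (pvLastVerdict ((ls.map (fun l => PySem.Str.lower (PySem.Str.strip l))).reverse) "harmful response:").or c) := by
  induction ls generalizing a b c with
  | nil => simp [pvLastVerdict]
  | cons l ls ih =>
    have hrev : ((l :: ls).map (fun l => PySem.Str.lower (PySem.Str.strip l))).reverse
        = (ls.map (fun l => PySem.Str.lower (PySem.Str.strip l))).reverse
          ++ [PySem.Str.lower (PySem.Str.strip l)] := by simp
    set m := PySem.Str.lower (PySem.Str.strip l) with hm
    simp only [List.foldl_cons, hrev, pvLastVerdict_append]
    by_cases h1 : PySem.Str.startswith m "harmful request:"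
    · have e2 := pvStartswith_excl m "harmful request:" "response refusal:" (by decide) (by decide) h1
      have e3 := pvStartswith_excl m "harmful request:" "harmful response:" (by decide) (by decide) h1
      have hstep : pvStepA (a, b, c) l = (some (PySem.Str.isIn "yes" m), b, c) := by
        unfold pvStepA; rw [← hm, if_pos h1]
      rw [hstep, ih, pvLV_single _ _ h1, pvLV_single_none _ _ e2, pvLV_single_none _ _ e3]
      simp only [Option.or_assoc, Option.some_or, Option.none_or]
    · by_cases h2 : PySem.Str.startswith m "response refusal:"
      · have e3 := pvStartswith_excl m "response refusal:" "harmful response:" (by decide) (by decide) h2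
        have hstep : pvStepA (a, b, c) l = (a, some (PySem.Str.isIn "yes" m), c) := by
          unfold pvStepA; rw [← hm, if_neg h1, if_pos h2]
        rw [hstep, ih, pvLV_single _ _ h2, pvLV_single_none _ _ (Bool.eq_false_iff.mpr h1),
          pvLV_single_none _ _ e3]
        simp only [Option.or_assoc, Option.some_or, Option.none_or]
      · by_cases h3 : PySem.Str.startswith m "harmful response:"
        · have hstep : pvStepA (a, b, c) l = (a, b, some (PySem.Str.isIn "yes" m)) := by
            unfold pvStepA; rw [← hm, if_neg h1, if_neg h2, if_pos h3]
          rw [hstep, ih, pvLV_single _ _ h3, pvLV_single_none _ _ (Bool.eq_false_iff.mpr h1),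
            pvLV_single_none _ _ (Bool.eq_false_iff.mpr h2)]
          simp only [Option.or_assoc, Option.some_or, Option.none_or]
        · have hstep : pvStepA (a, b, c) l = (a, b, c) := by
            unfold pvStepA
            rw [← hm, if_neg h1, if_neg h2, if_neg h3]
          rw [hstep, ih, pvLV_single_none _ _ (Bool.eq_false_iff.mpr h1),
            pvLV_single_none _ _ (Bool.eq_false_iff.mpr h2), pvLV_single_none _ _ (Bool.eq_false_iff.mpr h3)]
          simp only [Option.or_assoc, Option.none_or]

theorem pvLines_ne_nil (s : String) : (PySem.Str.split? s "\n").getD [] ≠ [] := by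
  unfold PySem.Str.split? PySem.Chars.split?
  split
  · simp_all
  · simpa using pvSplitOn_ne_nil s.toList "\n".toList

-- ===== VERDICT (by name: the statement is the Claim_ definition above) =====
theorem parse_safety_assessment_spec : Claim_equal_parse_safety_assessment := by
  intro assessment _
  unfold Spec_parse_safety_assessment parse_safety_assessment parse_safety_assessment_alt
  have hne := pvLines_ne_nil (PySem.Str.strip assessment)
  simp only [List.isEmpty_eq_false_iff.mpr hne, if_neg Bool.false_ne_true, pvFoldl_eq,
    Option.or_none]
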